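-- pv_equiv track=rewrite | github.com/kronos164/WSAA-coursework | assignments/assignment2-carddraw.py | full_flush
-- ===== SOURCE A (Python) =====
-- def full_flush(suits):
--     suit_counts = {}
--     for suit in suits:
--         if suit in suit_counts:
--             suit_counts[suit] += 1
--         else:
--             suit_counts[suit] = 1
--
--     flush = 0
--     for count in suit_counts.values():
--         if count == 5:
--             flush += 1
--     return flush
-- ===== SOURCE B (Python) =====
-- def full_flush(suits):
--     suit_counts = {}
--     flush = 0
--     for suit in suits:
--         c = suit_counts.get(suit, 0) + 1
--         suit_counts[suit] = c
--         if c == 5: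
--             flush += 1
--         elif c == 6:
--             flush -= 1
--     return flush
-- ===== Notes on version B (the rewrite author's own statement) =====
-- stated objective: alternative
-- what changed: Single pass that maintains the answer incrementally (flush += 1 on a suit's 4->5 transition, -= 1 on 5->6) instead of building the full counter and then scanning its values in a second loop.
import Mathlib
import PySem

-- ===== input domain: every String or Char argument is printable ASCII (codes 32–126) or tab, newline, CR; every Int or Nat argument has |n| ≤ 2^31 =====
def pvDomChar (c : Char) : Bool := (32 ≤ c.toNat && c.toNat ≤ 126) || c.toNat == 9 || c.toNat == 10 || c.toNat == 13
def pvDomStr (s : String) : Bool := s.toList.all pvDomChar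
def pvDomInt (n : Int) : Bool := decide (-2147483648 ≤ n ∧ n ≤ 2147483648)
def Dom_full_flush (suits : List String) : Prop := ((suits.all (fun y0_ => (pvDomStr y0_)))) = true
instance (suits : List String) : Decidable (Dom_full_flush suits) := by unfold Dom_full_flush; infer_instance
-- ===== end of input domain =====

-- B maintains the answer in the same single counting pass (flush adjusted on the 4→5 and
-- 5→6 transitions) instead of a second loop over the counter's values. Objective: alternative.

-- ===== PORT A =====
def full_flush (suits : List String) : Int :=
  let suit_counts : PySem.Dict String Int :=
    suits.foldl (fun d suit =>
      if d.contains suit then d.modify suit 0 (· + 1) else d.insert suit 1)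
      PySem.Dict.empty
  suit_counts.values.foldl (fun flush count => if count == 5 then flush + 1 else flush) 0

-- ===== PORT B =====
def full_flush_alt (suits : List String) : Int :=
  (suits.foldl (fun (st : PySem.Dict String Int × Int) suit =>
      let c := st.1.getD suit 0 + 1
      let d := st.1.insert suit c
      (d, if c == 5 then st.2 + 1 else if c == 6 then st.2 - 1 else st.2))
    (PySem.Dict.empty, 0)).2

-- ===== PRECONDITION & SPEC =====
def Spec_full_flush (suits : List String) (out : Int) : Prop := out = full_flush_alt suits
instance (suits : List String) (out : Int) : Decidable (Spec_full_flush suits out) := by unfold Spec_full_flush; infer_instance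

-- ===== CLAIM (what is proved, stated in full; the proofs are below) =====
def Claim_equal_full_flush : Prop := ∀ (suits : List String), Dom_full_flush suits → Spec_full_flush suits (full_flush suits)

-- ===== LEMMAS AND PROOFS =====

-- A's two-branch dict update is exactly B's unconditional insert of getD + 1.
lemma stepA_eq_stepD (d : PySem.Dict String Int) (x : String) :
    (if d.contains x then d.modify x 0 (· + 1) else d.insert x 1)
      = d.insert x (d.getD x 0 + 1) := by
  by_cases h : d.contains x = true
  · simp [PySem.Dict.modify, PySem.Dict.insert, h]
  · simp only [Bool.not_eq_true] at h
    rw [if_neg (by simp [h]), PySem.Dict.getD_of_not_contains d 0 h]; norm_num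

-- A's second loop counts the value 5.
lemma foldl_count5 (l : List Int) (a : Int) :
    l.foldl (fun flush count => if count == 5 then flush + 1 else flush) a
      = a + (l.count 5 : Int) := by
  induction l generalizing a with
  | nil => simp
  | cons y t ih =>
    simp only [List.foldl_cons, ih, List.count_cons]
    by_cases h : y = 5 <;> simp [h, beq_iff_eq] <;> omega

-- Effect of one counting insert on the number of 5-values.
lemma count5_insert (d : PySem.Dict String Int) (x : String) (hnd : d.keys.Nodup) :
    ((d.insert x (d.getD x 0 + 1)).values.count 5 : Int)
      = (d.values.count 5 : Int)
        + (if d.getD x 0 + 1 = 5 then 1 else if d.getD x 0 + 1 = 6 then -1 else 0) := by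
  by_cases h : d.contains x = true
  · -- exactly one item of d has key x; the insert rewrites it in place
    have h' := h
    rw [PySem.Dict.contains_eq_isSome_get?] at h'
    obtain ⟨v, hv⟩ := Option.isSome_iff_exists.mp h'
    have hmem : (x, v) ∈ d.items := PySem.Dict.mem_items_of_get?_eq_some d hv
    have hgd : d.getD x 0 = v := PySem.Dict.getD_of_get?_eq_some d 0 hv
    obtain ⟨l1, l2, hsplit⟩ := List.append_of_mem hmem
    have hnd' : (l1.map Prod.fst ++ x :: l2.map Prod.fst).Nodup := by
      simpa [PySem.Dict.keys, hsplit] using hnd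
    have hx1 : ∀ p ∈ l1, p.1 ≠ x := fun p hp hpx =>
      (List.disjoint_of_nodup_append hnd') (hpx ▸ List.mem_map_of_mem hp)
        (List.mem_cons_self ..)
    have hx2 : ∀ p ∈ l2, p.1 ≠ x := fun p hp hpx =>
      (List.nodup_cons.mp (List.Nodup.of_append_right hnd')).1
        (hpx ▸ List.mem_map_of_mem hp)
    simp only [PySem.Dict.values]
    rw [PySem.Dict.items_insert_of_contains d _ h, hsplit]
    rw [List.map_append, List.map_cons,
        List.map_congr_left (fun p hp => if_neg (by simpa using hx1 p hp)),
        List.map_congr_left (fun p hp => if_neg (by simpa using hx2 p hp))]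
    simp only [beq_self_eq_true, if_pos, List.map_append, List.map_cons,
      List.count_append, List.count_cons, hgd]
    simp only [List.map_id_fun', id, beq_iff_eq]
    split_ifs <;> push_cast <;> omega
  · simp only [Bool.not_eq_true] at h
    rw [PySem.Dict.getD_of_not_contains d 0 h]
    simp only [PySem.Dict.values]
    rw [PySem.Dict.items_insert_of_not_contains d _ h]
    simp [List.count_append]

-- Main invariant: B's running flush equals the 5-count of the dict built so far.
lemma flush_invariant (l : List String) (d : PySem.Dict String Int) (f : Int)
    (hnd : d.keys.Nodup) (hf : f = (d.values.count 5 : Int)) :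
    (l.foldl (fun (st : PySem.Dict String Int × Int) suit =>
        let c := st.1.getD suit 0 + 1
        let d := st.1.insert suit c
        (d, if c == 5 then st.2 + 1 else if c == 6 then st.2 - 1 else st.2)) (d, f)).2
      = ((l.foldl (fun d x => d.insert x (d.getD x 0 + 1)) d).values.count 5 : Int) := by
  induction l generalizing d f with
  | nil => simpa using hf
  | cons y t ih =>
    simp only [List.foldl_cons]
    apply ih
    · exact PySem.Dict.nodup_keys_insert _ _ _ hnd
    · rw [count5_insert d y hnd, hf]
      by_cases h5 : d.getD y 0 + 1 = 5
      · simp [h5]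
      · by_cases h6 : d.getD y 0 + 1 = 6
        · simp only [h6, beq_iff_eq, if_true]
          omega
        · simp [h5, h6, beq_iff_eq]

-- ===== VERDICT (by name: the statement is the Claim_ definition above) =====
theorem full_flush_spec : Claim_equal_full_flush := by
  intro suits _
  unfold Spec_full_flush full_flush full_flush_alt
  have hstep : (fun (d : PySem.Dict String Int) suit =>
      if d.contains suit then d.modify suit 0 (· + 1) else d.insert suit 1)
      = fun d x => d.insert x (d.getD x 0 + 1) := by
    funext d x; exact stepA_eq_stepD d x
  simp only [hstep, foldl_count5, zero_add]
  exact (flush_invariant suits PySem.Dict.empty 0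
    (by simp [PySem.Dict.keys, PySem.Dict.empty])
    (by simp [PySem.Dict.values, PySem.Dict.empty])).symm
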